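-- pv_equiv track=rewrite | github.com/med-air/EndoFM-LV | SV-RCNet/train_singlenet_phase_1fc.py | get_useful_start_idx2
-- ===== SOURCE A (Python) =====
-- def get_useful_start_idx2(sequence_length, list_each_length):
--     count = 0
--     idx = []
--     for i in range(len(list_each_length)):
--         each_idx = []
--         for j in range(count, count + (list_each_length[i] // sequence_length * sequence_length - sequence_length)):
--             each_idx.append(j)
--         count += len(each_idx)
--         idx.append(each_idx)
--     return idx
-- ===== SOURCE B (Python) =====
-- def get_useful_start_idx2(sequence_length, list_each_length):
--     # Build back-to-front: compute the grand total of useful indices once,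
--     # then walk the list in reverse, peeling each span off the top.
--     hi = sum(max(0, L // sequence_length * sequence_length - sequence_length)
--              for L in list_each_length)
--     idx = []
--     for L in reversed(list_each_length):
--         c = L // sequence_length * sequence_length - sequence_length
--         lo = hi - c if c > 0 else hi
--         idx.append(list(range(lo, hi)))
--         hi = lo
--     idx.reverse()
--     return idx
-- ===== Notes on version B (the rewrite author's own statement) =====
-- stated objective: alternative
-- what changed: Instead of threading an ascending counter forward, B computes the grand total of useful indices once, then builds the result back-to-front: it walks the list in reverse, peeling each span off the top of the running upper bound, and reverses the output at the end.
-- outside the precondition, e.g. on get_useful_start_idx2(0, [5]): A raises ZeroDivisionError, B raises ZeroDivisionError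
import Mathlib
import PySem

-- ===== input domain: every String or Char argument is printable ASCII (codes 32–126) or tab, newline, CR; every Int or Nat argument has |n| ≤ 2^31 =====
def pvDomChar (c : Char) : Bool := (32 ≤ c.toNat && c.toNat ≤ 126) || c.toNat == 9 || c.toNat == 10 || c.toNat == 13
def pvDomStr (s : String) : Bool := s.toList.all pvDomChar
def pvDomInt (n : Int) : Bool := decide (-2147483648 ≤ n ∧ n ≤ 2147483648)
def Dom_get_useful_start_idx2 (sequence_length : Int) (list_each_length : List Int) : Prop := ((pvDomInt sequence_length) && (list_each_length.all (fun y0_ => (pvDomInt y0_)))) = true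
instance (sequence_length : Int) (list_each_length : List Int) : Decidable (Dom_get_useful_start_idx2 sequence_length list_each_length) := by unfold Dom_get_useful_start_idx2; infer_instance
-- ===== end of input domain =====

-- B builds the result back-to-front: it computes the grand total of useful indices
-- once, then walks the list in reverse peeling each span off the top (alternative
-- decomposition, same cost).


-- ===== PORT A =====
def get_useful_start_idx2 (sequence_length : Int) (list_each_length : List Int) : List (List Int) :=
  ((PySem.List.pyRange 0 (list_each_length.length : Int) 1).foldl
    (fun (st : Int × List (List Int)) i =>
      let each_idx : List Int :=
        (PySem.List.pyRange st.1
          (st.1 + (PySem.Int.floordiv (PySem.List.pyGetD list_each_length i 0) sequence_length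
                     * sequence_length - sequence_length)) 1).foldl
          (fun acc j => acc ++ [j]) []
      (st.1 + (each_idx.length : Int), st.2 ++ [each_idx]))
    (0, [])).2

-- ===== PORT B =====
def get_useful_start_idx2_alt (sequence_length : Int) (list_each_length : List Int) : List (List Int) :=
  let hi0 : Int := list_each_length.foldl
    (fun a L => a + max 0 (PySem.Int.floordiv L sequence_length * sequence_length - sequence_length)) 0
  let st := list_each_length.reverse.foldl
    (fun (st : Int × List (List Int)) L =>
      let c := PySem.Int.floordiv L sequence_length * sequence_length - sequence_length
      let lo := if c > 0 then st.1 - c else st.1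
      (lo, st.2 ++ [PySem.List.pyRange lo st.1 1]))
    (hi0, [])
  st.2.reverse

-- ===== PRECONDITION & SPEC =====
-- Pre_ excludes sequence_length = 0, on which Python A raises ZeroDivisionError.
def Pre_get_useful_start_idx2 (sequence_length : Int) (list_each_length : List Int) : Prop :=
  sequence_length ≠ 0
instance (sequence_length : Int) (list_each_length : List Int) : Decidable (Pre_get_useful_start_idx2 sequence_length list_each_length) := by unfold Pre_get_useful_start_idx2; infer_instance
def pvWitness_get_useful_start_idx2 : Int × List Int := (2, [7, 3, 5])
def Spec_get_useful_start_idx2 (sequence_length : Int) (list_each_length : List Int) (out : List (List Int)) : Prop := out = get_useful_start_idx2_alt sequence_length list_each_length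
instance (sequence_length : Int) (list_each_length : List Int) (out : List (List Int)) : Decidable (Spec_get_useful_start_idx2 sequence_length list_each_length out) := by unfold Spec_get_useful_start_idx2; infer_instance

-- ===== CLAIM (what is proved, stated in full; the proofs are below) =====
def Claim_equal_get_useful_start_idx2 : Prop := ∀ (sequence_length : Int) (list_each_length : List Int), Dom_get_useful_start_idx2 sequence_length list_each_length → Pre_get_useful_start_idx2 sequence_length list_each_length → Spec_get_useful_start_idx2 sequence_length list_each_length (get_useful_start_idx2 sequence_length list_each_length)

-- ===== LEMMAS AND PROOFS =====

-- clamped per-element count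
def pvM (s L : Int) : Int := max 0 (PySem.Int.floordiv L s * s - s)

-- total number of useful indices
def pvTotal (s : Int) (ls : List Int) : Int := (ls.map (pvM s)).sum

-- reference spine: the common meaning of both programs
def pvSpine (s : Int) : Int → List Int → List (List Int)
  | _, [] => []
  | count, L :: rest =>
      PySem.List.pyRange count (count + pvM s L) 1 :: pvSpine s (count + pvM s L) rest

theorem pv_foldl_app (l : List Int) : ∀ acc : List Int,
    l.foldl (fun a j => a ++ [j]) acc = acc ++ l := by
  induction l with
  | nil => simp
  | cons x xs ih => intro acc; simp [List.foldl_cons, ih]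

theorem pv_range_clamp (a c : Int) :
    PySem.List.pyRange a (a + c) 1 = PySem.List.pyRange a (a + max 0 c) 1 := by
  rcases (by omega : 0 ≤ c ∨ c < 0) with h | h
  · rw [max_eq_right h]
  · rw [max_eq_left (le_of_lt h),
      PySem.List.pyRange_one_eq_nil (by omega),
      PySem.List.pyRange_one_eq_nil (by omega)]

theorem pv_len_range (a c : Int) :
    ((PySem.List.pyRange a (a + c) 1).length : Int) = max 0 c := by
  rw [PySem.List.length_pyRange_one]
  omega

theorem pvA_loop (s : Int) (ls : List Int) : ∀ (count : Int) (acc : List (List Int)),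
    (ls.foldl
      (fun (st : Int × List (List Int)) L =>
        let each_idx : List Int :=
          (PySem.List.pyRange st.1
            (st.1 + (PySem.Int.floordiv L s * s - s)) 1).foldl
            (fun acc j => acc ++ [j]) []
        (st.1 + (each_idx.length : Int), st.2 ++ [each_idx]))
      (count, acc)).2 = acc ++ pvSpine s count ls := by
  induction ls with
  | nil => intro count acc; simp [pvSpine]
  | cons L rest ih =>
      intro count acc
      simp only [List.foldl_cons]
      rw [pv_foldl_app, List.nil_append]
      have hlen : count + ((PySem.List.pyRange count (count + (PySem.Int.floordiv L s * s - s)) 1).length : Int)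
          = count + pvM s L := by
        rw [pv_len_range]; rfl
      rw [hlen, ih, pvSpine, pv_range_clamp]
      simp [pvM]

theorem pv_total_foldl (s : Int) (ls : List Int) : ∀ a : Int,
    ls.foldl (fun a L => a + max 0 (PySem.Int.floordiv L s * s - s)) a
      = a + pvTotal s ls := by
  induction ls with
  | nil => intro a; simp [pvTotal]
  | cons L rest ih =>
      intro a
      simp only [List.foldl_cons]
      rw [ih]
      simp [pvTotal, pvM]
      ring

theorem pvB_loop (s : Int) (ls : List Int) : ∀ (count : Int) (acc : List (List Int)),
    ls.foldr
      (fun L (st : Int × List (List Int)) =>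
        let c := PySem.Int.floordiv L s * s - s
        let lo := if c > 0 then st.1 - c else st.1
        (lo, st.2 ++ [PySem.List.pyRange lo st.1 1]))
      (count + pvTotal s ls, acc)
    = (count, acc ++ (pvSpine s count ls).reverse) := by
  induction ls with
  | nil => intro count acc; simp [pvTotal, pvSpine]
  | cons L rest ih =>
      intro count acc
      have htot : count + pvTotal s (L :: rest) = (count + pvM s L) + pvTotal s rest := by
        simp [pvTotal]; ring
      rw [List.foldr_cons, htot, ih]
      set c := PySem.Int.floordiv L s * s - s with hc
      have hM : pvM s L = max 0 c := rfl
      have hlo : (if c > 0 then (count + pvM s L) - c else (count + pvM s L)) = count := by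
        rcases (by omega : 0 < c ∨ c ≤ 0) with h | h
        · rw [if_pos h, hM, max_eq_right (le_of_lt h)]; ring
        · rw [if_neg (by omega), hM, max_eq_left h]; ring
      simp only [hlo]
      have hsp : pvSpine s count (L :: rest)
          = PySem.List.pyRange count (count + pvM s L) 1 :: pvSpine s (count + pvM s L) rest := rfl
      rw [hsp]
      simp

theorem pvA_eq_spine (s : Int) (ls : List Int) :
    get_useful_start_idx2 s ls = pvSpine s 0 ls := by
  unfold get_useful_start_idx2
  rw [PySem.List.foldl_pyRange_zero_pyGetD' ls 0
    (fun (st : Int × List (List Int)) L =>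
      let each_idx : List Int :=
        (PySem.List.pyRange st.1 (st.1 + (PySem.Int.floordiv L s * s - s)) 1).foldl
          (fun acc j => acc ++ [j]) []
      (st.1 + (each_idx.length : Int), st.2 ++ [each_idx])) (0, [])]
  rw [pvA_loop]
  simp

theorem pvB_eq_spine (s : Int) (ls : List Int) :
    get_useful_start_idx2_alt s ls = pvSpine s 0 ls := by
  unfold get_useful_start_idx2_alt
  dsimp only
  rw [pv_total_foldl, List.foldl_reverse, zero_add,
    show pvTotal s ls = 0 + pvTotal s ls by ring, pvB_loop]
  simp

-- ===== VERDICT (by name: the statement is the Claim_ definition above) =====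
theorem get_useful_start_idx2_spec : Claim_equal_get_useful_start_idx2 := by
  intro s ls _ _
  unfold Spec_get_useful_start_idx2
  rw [pvA_eq_spine, pvB_eq_spine]
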